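-- pv_equiv track=rewrite | github.com/LPDigital-Agent/lpd-faiston-allinone | server/agentcore-inventory/agents/validation/tools/validate_schema.py | _find_similar_field
-- ===== SOURCE A (Python) =====
-- from typing import Dict, Any, List, Optional, Set
--
-- def _find_similar_field(target_field: str, schema: Dict[str, Dict[str, Any]]) -> Optional[str]:
--     """
--     Find a similar field name for typo suggestions.
--     """
--     target_lower = target_field.lower()
--
--     # Exact match (case-insensitive)
--     for field in schema:
--         if field.lower() == target_lower:
--             return field
--
--     # Partial match
--     for field in schema:
--         if target_lower in field or field in target_lower:
--             return field
--
--     # Common aliases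
--     aliases = {
--         "pn": "part_number",
--         "partnumber": "part_number",
--         "desc": "description",
--         "qty": "quantity",
--         "qtd": "quantity",
--         "sn": "serial_number",
--         "loc": "location",
--     }
--
--     return aliases.get(target_lower)
-- ===== SOURCE B (Python) =====
-- from typing import Dict, Any, Optional
--
-- def _find_similar_field(target_field: str, schema: Dict[str, Dict[str, Any]]) -> Optional[str]:
--     """Rank-and-select: score every matching field (0 = exact, 1 = partial) with its
--     position, then take the minimum by (score, position)."""
--     target_lower = target_field.lower()
--     candidates = [
--         (0 if fl == target_lower else 1, i, field)
--         for i, field in enumerate(schema)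
--         if (fl := field.lower()) == target_lower or target_lower in field or field in target_lower
--     ]
--     if candidates:
--         return min(candidates, key=lambda c: (c[0], c[1]))[2]
--     aliases = {
--         "pn": "part_number",
--         "partnumber": "part_number",
--         "desc": "description",
--         "qty": "quantity",
--         "qtd": "quantity",
--         "sn": "serial_number",
--         "loc": "location",
--     }
--     return aliases.get(target_lower)
-- ===== Notes on version B (the rewrite author's own statement) =====
-- stated objective: alternative
-- what changed: Replaces A's staged scans (exact-match loop, then partial-match loop) with a rank-and-select algorithm: one comprehension scores every matching field as (0 for exact / 1 for partial, position, field) and the answer is the minimum by (score, position), falling back to the alias table.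
import Mathlib
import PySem

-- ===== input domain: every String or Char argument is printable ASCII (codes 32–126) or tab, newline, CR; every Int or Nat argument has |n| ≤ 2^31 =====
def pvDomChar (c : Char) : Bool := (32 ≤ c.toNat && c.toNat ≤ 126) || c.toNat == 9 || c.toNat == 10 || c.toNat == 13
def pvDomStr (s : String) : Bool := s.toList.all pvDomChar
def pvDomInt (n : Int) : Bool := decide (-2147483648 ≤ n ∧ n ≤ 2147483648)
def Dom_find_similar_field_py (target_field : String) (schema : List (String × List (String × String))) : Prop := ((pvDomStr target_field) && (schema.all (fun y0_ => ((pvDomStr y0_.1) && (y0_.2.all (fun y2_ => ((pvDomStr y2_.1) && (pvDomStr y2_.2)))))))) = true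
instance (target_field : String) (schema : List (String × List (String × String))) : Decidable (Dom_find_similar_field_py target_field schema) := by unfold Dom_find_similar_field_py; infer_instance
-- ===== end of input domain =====

-- B replaces A's staged scans with a rank-and-select algorithm: a scored candidate list (0 = exact, 1 = partial, with position) and a minimum by (score, position); same return value (objective: alternative).


-- shared helpers: the two tests and the alias table, exactly as in the Python sources
def pvExact (tl : String) (kv : String × List (String × String)) : Bool :=
  PySem.Str.lower kv.1 == tl
def pvPartial (tl : String) (kv : String × List (String × String)) : Bool :=
  PySem.Str.isIn tl kv.1 || PySem.Str.isIn kv.1 tl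
def pvAliases : PySem.Dict String String :=
  PySem.Dict.ofList [("pn","part_number"),("partnumber","part_number"),("desc","description"),
                     ("qty","quantity"),("qtd","quantity"),("sn","serial_number"),("loc","location")]

-- ===== PORT A =====
def find_similar_field_py (target_field : String) (schema : List (String × List (String × String))) : Option String :=
  let target_lower := PySem.Str.lower target_field
  -- first loop: exact match (case-insensitive)
  match schema.find? (fun kv => pvExact target_lower kv) with
  | some kv => some kv.1
  | none =>
    -- second loop: partial match (substring either way, on the original field)
    match schema.find? (fun kv => pvPartial target_lower kv) with
    | some kv => some kv.1
    | none => pvAliases.get? target_lower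

-- ===== PORT B =====
def find_similar_field_py_alt (target_field : String) (schema : List (String × List (String × String))) : Option String :=
  let target_lower := PySem.Str.lower target_field
  -- the comprehension: (score, position, field) for every matching field
  let candidates : List (Int × Int × String) :=
    (PySem.List.enumerate schema).filterMap (fun p =>
      if pvExact target_lower p.2 || pvPartial target_lower p.2 then
        some ((if pvExact target_lower p.2 then (0 : Int) else 1), p.1, p.2.1)
      else none)
  -- min(candidates, key=lambda c: (c[0], c[1]))[2], guarded by 'if candidates'
  match PySem.List.min2? candidates (fun c => c.1) (fun c => c.2.1) with
  | some c => some c.2.2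
  | none => pvAliases.get? target_lower

-- ===== PRECONDITION & SPEC =====
def Spec_find_similar_field_py (target_field : String) (schema : List (String × List (String × String))) (out : Option String) : Prop := out = find_similar_field_py_alt target_field schema
instance (target_field : String) (schema : List (String × List (String × String))) (out : Option String) : Decidable (Spec_find_similar_field_py target_field schema out) := by unfold Spec_find_similar_field_py; infer_instance

-- ===== CLAIM (what is proved, stated in full; the proofs are below) =====
def Claim_equal_find_similar_field_py : Prop := ∀ (target_field : String) (schema : List (String × List (String × String))), Dom_find_similar_field_py target_field schema → Spec_find_similar_field_py target_field schema (find_similar_field_py target_field schema)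

-- ===== LEMMAS AND PROOFS =====

/-- The fold inside `min2?`, specialised to keys `(c.1, c.2.1)`. -/
def pvStep (acc : Option (Int × Int × String)) (x : Int × Int × String) : Option (Int × Int × String) :=
  match acc with
  | none => some x
  | some m => if (decide (x.1 < m.1) || !decide (m.1 < x.1) && decide (x.2.1 < m.2.1)) then some x else some m

theorem pv_min2_eq_foldl (cs : List (Int × Int × String)) :
    PySem.List.min2? cs (fun c => c.1) (fun c => c.2.1) = cs.foldl pvStep none := by
  unfold PySem.List.min2?
  congr 1
  funext acc x
  cases acc <;> rfl

/-- With scores in {0,1} and strictly increasing positions, the fold keeps a score-0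
    accumulator forever, otherwise switches to the first score-0 candidate. -/
theorem pv_fold_char (cs : List (Int × Int × String)) (m : Int × Int × String)
    (hm : m.1 = 0 ∨ m.1 = 1) (hcs : ∀ c ∈ cs, c.1 = 0 ∨ c.1 = 1)
    (hlt : ∀ c ∈ cs, m.2.1 < c.2.1)
    (hp : cs.Pairwise (fun a b => a.2.1 < b.2.1)) :
    cs.foldl pvStep (some m)
      = some (if m.1 = 0 then m else ((cs.find? (fun c => c.1 == 0)).getD m)) := by
  induction cs generalizing m with
  | nil => simp
  | cons c rest ih =>
    have hc := hcs c (List.mem_cons_self)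
    have hcm := hlt c (List.mem_cons_self)
    have hrest : ∀ d ∈ rest, d.1 = 0 ∨ d.1 = 1 := fun d hd => hcs d (List.mem_cons_of_mem _ hd)
    have hprest : rest.Pairwise (fun a b => a.2.1 < b.2.1) := hp.of_cons
    have hcrest : ∀ d ∈ rest, c.2.1 < d.2.1 := fun d hd => (List.pairwise_cons.mp hp).1 d hd
    rcases hm with hm | hm
    · -- accumulator already exact: keep it
      have hstep : pvStep (some m) c = some m := by
        rcases hc with hc | hc <;> simp [pvStep, hm, hc] <;> omega
      rw [List.foldl_cons, hstep,
        ih m (Or.inl hm) hrest (fun d hd => hlt d (List.mem_cons_of_mem _ hd)) hprest]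
      simp [hm]
    · rcases hc with hc | hc
      · -- head is exact: switch to it, never leave it
        have hstep : pvStep (some m) c = some c := by simp [pvStep, hm, hc]
        rw [List.foldl_cons, hstep, ih c (Or.inl hc) hrest hcrest hprest]
        simp [hm, hc]
      · -- head is partial: keep the earlier accumulator
        have hstep : pvStep (some m) c = some m := by simp [pvStep, hm, hc]; omega
        rw [List.foldl_cons, hstep,
          ih m (Or.inr hm) hrest (fun d hd => hlt d (List.mem_cons_of_mem _ hd)) hprest]
        simp [hm, hc]

/-- `min2?` of such a candidate list is the first score-0 element, else the head. -/
theorem pv_min2_char (cs : List (Int × Int × String))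
    (hcs : ∀ c ∈ cs, c.1 = 0 ∨ c.1 = 1)
    (hp : cs.Pairwise (fun a b => a.2.1 < b.2.1)) :
    PySem.List.min2? cs (fun c => c.1) (fun c => c.2.1)
      = match cs.find? (fun c => c.1 == 0) with
        | some c => some c
        | none => cs.head? := by
  cases cs with
  | nil => rfl
  | cons c rest =>
    have hc := hcs c (List.mem_cons_self)
    rw [pv_min2_eq_foldl, List.foldl_cons]
    have hstep : pvStep none c = some c := rfl
    rw [hstep, pv_fold_char rest c hc (fun d hd => hcs d (List.mem_cons_of_mem _ hd))
      (fun d hd => (List.pairwise_cons.mp hp).1 d hd) hp.of_cons]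
    rcases hc with hc | hc
    · simp [hc]
    · simp only [List.find?_cons, hc]
      norm_num
      cases h : rest.find? (fun c => c.1 == 0) <;> simp

/-- Candidate builder over `enumerate` with an arbitrary start. -/
def pvCands (tl : String) (l : List (String × List (String × String))) (s : Int) :
    List (Int × Int × String) :=
  (PySem.List.enumerate l s).filterMap (fun p =>
    if pvExact tl p.2 || pvPartial tl p.2 then
      some ((if pvExact tl p.2 then (0 : Int) else 1), p.1, p.2.1)
    else none)

theorem pv_cands_cons (tl : String) (kv : String × List (String × String))
    (l : List (String × List (String × String))) (s : Int) :
    pvCands tl (kv :: l) s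
      = (if pvExact tl kv || pvPartial tl kv then
          [((if pvExact tl kv then (0 : Int) else 1), s, kv.1)] else []) ++ pvCands tl l (s + 1) := by
  simp only [pvCands, PySem.List.enumerate_cons, List.filterMap_cons]
  split_ifs <;> simp

theorem pv_cands_scores (tl : String) (l : List (String × List (String × String))) (s : Int) :
    ∀ c ∈ pvCands tl l s, c.1 = 0 ∨ c.1 = 1 := by
  intro c hc
  simp only [pvCands, List.mem_filterMap] at hc
  obtain ⟨p, _, hp⟩ := hc
  by_cases h : (pvExact tl p.2 || pvPartial tl p.2) = true
  · rw [if_pos h] at hp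
    obtain rfl := Option.some.inj hp
    by_cases he : pvExact tl p.2 = true <;> simp [he]
  · rw [if_neg h] at hp
    exact absurd hp (by simp)

theorem pv_cands_pairwise (tl : String) (l : List (String × List (String × String))) (s : Int) :
    (pvCands tl l s).Pairwise (fun a b => a.2.1 < b.2.1) := by
  have hen := PySem.List.pairwise_lt_enumerate l s
  refine List.Pairwise.filterMap _ (fun p q hpq a ha b hb => ?_) hen
  by_cases hp : (pvExact tl p.2 || pvPartial tl p.2) = true
  · by_cases hq : (pvExact tl q.2 || pvPartial tl q.2) = true
    · rw [if_pos hp] at ha; rw [if_pos hq] at hb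
      obtain rfl := Option.some.inj ha
      obtain rfl := Option.some.inj hb
      simpa using hpq
    · rw [if_neg hq] at hb; cases hb
  · rw [if_neg hp] at ha; cases ha

/-- The first score-0 candidate projects to the first exact match. -/
theorem pv_cands_find0 (tl : String) (l : List (String × List (String × String))) (s : Int) :
    ((pvCands tl l s).find? (fun c => c.1 == 0)).map (fun c => c.2.2)
      = (l.find? (fun kv => pvExact tl kv)).map (fun kv => kv.1) := by
  induction l generalizing s with
  | nil => rfl
  | cons kv rest ih =>
    rw [pv_cands_cons]
    by_cases he : pvExact tl kv = true
    · simp [he]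
    · by_cases hpp : pvPartial tl kv = true
      · simp [he, hpp, ih]
      · simp [he, hpp, ih]

/-- The head candidate projects to the first field matching at all. -/
theorem pv_cands_head (tl : String) (l : List (String × List (String × String))) (s : Int) :
    ((pvCands tl l s).head?).map (fun c => c.2.2)
      = (l.find? (fun kv => pvExact tl kv || pvPartial tl kv)).map (fun kv => kv.1) := by
  induction l generalizing s with
  | nil => rfl
  | cons kv rest ih =>
    rw [pv_cands_cons]
    by_cases h : (pvExact tl kv || pvPartial tl kv) = true
    · simp [h]
    · simp [h, ih]

/-- If no field is exact, matching-at-all means matching partially. -/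
theorem pv_find_or (tl : String) (l : List (String × List (String × String)))
    (h : l.find? (fun kv => pvExact tl kv) = none) :
    l.find? (fun kv => pvExact tl kv || pvPartial tl kv)
      = l.find? (fun kv => pvPartial tl kv) := by
  induction l with
  | nil => rfl
  | cons kv rest ih =>
    rw [List.find?_cons] at h ⊢
    rw [List.find?_cons]
    by_cases he : pvExact tl kv = true
    · simp [he] at h
    · simp only [he] at h ⊢
      by_cases hpp : pvPartial tl kv = true <;> simp [hpp, ih (by simpa [he] using h)]

theorem pv_eq (target_field : String) (schema : List (String × List (String × String))) :
    find_similar_field_py target_field schema = find_similar_field_py_alt target_field schema := by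
  simp only [find_similar_field_py, find_similar_field_py_alt]
  set tl := PySem.Str.lower target_field with htl
  have hchar := pv_min2_char (pvCands tl schema 0) (pv_cands_scores tl schema 0)
    (pv_cands_pairwise tl schema 0)
  have hcands : (PySem.List.enumerate schema).filterMap (fun p =>
      if pvExact tl p.2 || pvPartial tl p.2 then
        some ((if pvExact tl p.2 then (0 : Int) else 1), p.1, p.2.1)
      else none) = pvCands tl schema 0 := rfl
  rw [hcands, hchar]
  cases hfe : schema.find? (fun kv => pvExact tl kv) with
  | some kv =>
    have h0 := pv_cands_find0 tl schema 0
    rw [hfe] at h0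
    cases hf : (pvCands tl schema 0).find? (fun c => c.1 == 0) with
    | none => rw [hf] at h0; simp at h0
    | some c =>
      rw [hf] at h0
      simp only [Option.map_some, Option.some.injEq] at h0
      simp [h0]
  | none =>
    have h0 := pv_cands_find0 tl schema 0
    rw [hfe] at h0
    have hfnone : (pvCands tl schema 0).find? (fun c => c.1 == 0) = none := by
      cases hf : (pvCands tl schema 0).find? (fun c => c.1 == 0) with
      | none => rfl
      | some c => rw [hf] at h0; simp at h0
    rw [hfnone]
    have hh := pv_cands_head tl schema 0
    rw [pv_find_or tl schema hfe] at hh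
    cases hfp : schema.find? (fun kv => pvPartial tl kv) with
    | some kv =>
      rw [hfp] at hh
      cases hhd : (pvCands tl schema 0).head? with
      | none => rw [hhd] at hh; simp at hh
      | some c =>
        rw [hhd] at hh
        simp only [Option.map_some, Option.some.injEq] at hh
        simp [hh]
    | none =>
      rw [hfp] at hh
      cases hhd : (pvCands tl schema 0).head? with
      | none => simp
      | some c => rw [hhd] at hh; simp at hh

-- ===== VERDICT (by name: the statement is the Claim_ definition above) =====
theorem find_similar_field_py_spec : Claim_equal_find_similar_field_py := by
  intro t s _
  exact pv_eq t s
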